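-- pv_equiv track=rewrite | github.com/seruva19/ayase | src/ayase/modules/vlm_judge.py | _match_label
-- ===== SOURCE A (Python) =====
-- from typing import Dict, List, Optional, Tuple
--
-- def _match_label(response: str, labels: List[str]) -> str:
--     response_lower = response.lower().strip()
--
--     # Exact match
--     for label in labels:
--         if label == response_lower:
--             return label
--
--     # Substring match (response contains a label)
--     for label in labels:
--         if label in response_lower:
--             return label
--
--     # Token overlap match
--     response_tokens = set(response_lower.replace("_", " ").split())
--     best_label = labels[-1]  # default to last (often "neutral" / "none")
--     best_overlap = 0
--     for label in labels:
--         label_tokens = set(label.replace("_", " ").split())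
--         overlap = len(response_tokens & label_tokens)
--         if overlap > best_overlap:
--             best_overlap = overlap
--             best_label = label
--
--     return best_label
-- ===== SOURCE B (Python) =====
-- from typing import List
--
-- def _match_label(response: str, labels: List[str]) -> str:
--     response_lower = response.lower().strip()
--     response_tokens = set(response_lower.replace("_", " ").split())
--
--     exact = None
--     substr = None
--     best_label = labels[-1]
--     best_overlap = 0
--     for label in labels:
--         if exact is None and label == response_lower:
--             exact = label
--         if substr is None and label in response_lower:
--             substr = label
--         overlap = len(response_tokens & set(label.replace("_", " ").split()))
--         if overlap > best_overlap:
--             best_overlap = overlap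
--             best_label = label
--
--     if exact is not None:
--         return exact
--     if substr is not None:
--         return substr
--     return best_label
-- ===== Notes on version B (the rewrite author's own statement) =====
-- stated objective: alternative
-- what changed: Replaces A's three sequential scans over labels (exact, then substring, then overlap) with one single pass that simultaneously records the first exact match, the first substring match, and the best-overlap label, selecting by priority afterwards.
-- outside the precondition, e.g. on _match_label('x', []): A raises IndexError, B raises IndexError
import Mathlib
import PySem

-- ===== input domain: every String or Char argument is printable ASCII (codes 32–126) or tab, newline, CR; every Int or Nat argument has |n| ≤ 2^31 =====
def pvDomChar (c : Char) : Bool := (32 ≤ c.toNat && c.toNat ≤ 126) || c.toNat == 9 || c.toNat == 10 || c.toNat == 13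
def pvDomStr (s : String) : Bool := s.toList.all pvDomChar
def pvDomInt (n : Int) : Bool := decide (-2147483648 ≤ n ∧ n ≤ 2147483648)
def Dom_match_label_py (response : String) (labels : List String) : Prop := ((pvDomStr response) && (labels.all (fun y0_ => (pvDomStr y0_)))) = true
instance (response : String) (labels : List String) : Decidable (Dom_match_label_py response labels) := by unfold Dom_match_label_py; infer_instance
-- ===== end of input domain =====

-- B folds A's three sequential scans over the labels into one pass that tracks the first
-- exact match, the first substring match and the best-overlap label at once (objective: alternative).


-- ===== PORT A =====
-- first label equal to the response (A's first loop, early return)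
def pvExactScan (r : String) : List String → Option String
  | [] => none
  | l :: ls => if l == r then some l else pvExactScan r ls

-- first label that is a substring of the response (A's second loop)
def pvSubScan (r : String) : List String → Option String
  | [] => none
  | l :: ls => if PySem.Str.isIn l r then some l else pvSubScan r ls

def pvTokens (s : String) : PySem.Set String :=
  PySem.Set.ofList (PySem.Str.split₀ (PySem.Str.replace s "_" " "))

def pvOverlap (rtok : PySem.Set String) (l : String) : Int :=
  PySem.Set.len (PySem.Set.inter rtok (pvTokens l))

def match_label_py (response : String) (labels : List String) : String :=
  let response_lower := PySem.Str.strip (PySem.Str.lower response)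
  match pvExactScan response_lower labels with
  | some l => l
  | none =>
    match pvSubScan response_lower labels with
    | some l => l
    | none =>
      let response_tokens := pvTokens response_lower
      match PySem.List.pyGet? labels (-1) with
      | none => ""   -- Python raises IndexError here (labels = []); excluded by Pre_
      | some d =>
        (labels.foldl
          (fun (st : String × Int) l =>
            let overlap := pvOverlap response_tokens l
            if overlap > st.2 then (l, overlap) else st)
          (d, 0)).1

-- ===== PORT B =====
def pvStepB (r : String) (rtok : PySem.Set String)
    (st : Option String × Option String × String × Int) (l : String) :
    Option String × Option String × String × Int :=
  let e := if st.1.isNone && l == r then some l else st.1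
  let s := if st.2.1.isNone && PySem.Str.isIn l r then some l else st.2.1
  let overlap := pvOverlap rtok l
  if overlap > st.2.2.2 then (e, s, l, overlap) else (e, s, st.2.2.1, st.2.2.2)

def match_label_py_alt (response : String) (labels : List String) : String :=
  let r := PySem.Str.strip (PySem.Str.lower response)
  let rtok := pvTokens r
  match PySem.List.pyGet? labels (-1) with
  | none => ""   -- Python raises IndexError here (labels = []); excluded by Pre_
  | some d =>
    let st := labels.foldl (pvStepB r rtok) (none, none, d, 0)
    match st.1 with
    | some l => l
    | none =>
      match st.2.1 with
      | some l => l
      | none => st.2.2.1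

-- ===== PRECONDITION & SPEC =====
-- A evaluates labels[-1], which raises IndexError on an empty label list.
def Pre_match_label_py (response : String) (labels : List String) : Prop := labels ≠ []
instance (response : String) (labels : List String) : Decidable (Pre_match_label_py response labels) := by unfold Pre_match_label_py; infer_instance
def pvWitness_match_label_py : String × List String := ("Cat", ["cat", "dog"])

def Spec_match_label_py (response : String) (labels : List String) (out : String) : Prop := out = match_label_py_alt response labels
instance (response : String) (labels : List String) (out : String) : Decidable (Spec_match_label_py response labels out) := by unfold Spec_match_label_py; infer_instance

-- ===== CLAIM (what is proved, stated in full; the proofs are below) =====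
def Claim_equal_match_label_py : Prop := ∀ (response : String) (labels : List String), Dom_match_label_py response labels → Pre_match_label_py response labels → Spec_match_label_py response labels (match_label_py response labels)

-- ===== LEMMAS AND PROOFS =====

-- B's single fold computes A's three scans at once: the first exact match (behind the carried
-- candidate), the first substring match, and A's overlap fold on the (best, overlap) pair.
theorem pvStepB_unfolds (r : String) (rtok : PySem.Set String) (ls : List String)
    (e s : Option String) (b : String) (o : Int) :
    ls.foldl (pvStepB r rtok) (e, s, b, o) =
      (e.orElse (fun _ => pvExactScan r ls),
       s.orElse (fun _ => pvSubScan r ls),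
       ls.foldl (fun (st : String × Int) l =>
         let overlap := pvOverlap rtok l
         if overlap > st.2 then (l, overlap) else st) (b, o)) := by
  induction ls generalizing e s b o with
  | nil => simp [pvExactScan, pvSubScan]
  | cons l ls ih =>
    simp only [List.foldl_cons, pvStepB, pvExactScan, pvSubScan]
    cases e <;> cases s <;>
      by_cases h1 : (l == r) = true <;>
      by_cases h2 : PySem.Chars.isIn l.toList r.toList = true <;>
      by_cases h3 : pvOverlap rtok l > o <;>
      simp [h1, h2, h3, ih, Option.orElse]

-- ===== VERDICT (by name: the statement is the Claim_ definition above) =====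
theorem match_label_py_spec : Claim_equal_match_label_py := by
  intro response labels _ hpre
  unfold Spec_match_label_py match_label_py match_label_py_alt
  have hne : labels ≠ [] := hpre
  obtain ⟨d, hd⟩ : ∃ d, PySem.List.pyGet? labels (-1) = some d := by
    rw [PySem.List.pyGet?_neg_one]
    exact Option.isSome_iff_exists.mp (by simp [List.getLast?_isSome, hne])
  simp only [hd, pvStepB_unfolds]
  cases pvExactScan (PySem.Str.strip (PySem.Str.lower response)) labels <;>
    cases pvSubScan (PySem.Str.strip (PySem.Str.lower response)) labels <;>
      simp [Option.orElse]
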